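-- pv_equiv track=rewrite | github.com/tyevans/knowledge-mapper | backend/app/services/consolidation/string_similarity.py | tokenize_name
-- ===== SOURCE A (Python) =====
-- def tokenize_name(name: str) -> list[str]:
--     """
--     Tokenize a name into individual tokens.
--
--     Handles various separators:
--     - Spaces: "John Smith" -> ["john", "smith"]
--     - Underscores: "domain_event" -> ["domain", "event"]
--     - CamelCase: "DomainEvent" -> ["domain", "event"]
--     - Hyphens: "semi-colon" -> ["semi", "colon"]
--
--     Args:
--         name: Name to tokenize
--
--     Returns:
--         List of lowercase tokens
--     """
--     if not name:
--         return []
--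
--     # Handle CamelCase: insert space before uppercase letters
--     result = ""
--     for i, char in enumerate(name):
--         if char.isupper() and i > 0 and name[i - 1].islower():
--             result += " "
--         result += char
--
--     # Replace common separators with spaces
--     for sep in ["_", "-", ".", "/"]:
--         result = result.replace(sep, " ")
--
--     # Split and lowercase
--     tokens = [t.lower().strip() for t in result.split() if t.strip()]
--
--     return tokens
-- ===== SOURCE B (Python) =====
-- def tokenize_name(name: str) -> list[str]:
--     """Single-pass tokenizer: one traversal with a current-token buffer
--     instead of build-string / replace-loop / split pipeline."""
--     tokens = []
--     buf = []
--     for i, ch in enumerate(name):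
--         if ch.isspace() or ch in "_-./":
--             if buf:
--                 tokens.append("".join(buf).lower())
--                 buf = []
--         elif ch.isupper() and i > 0 and name[i - 1].islower():
--             if buf:
--                 tokens.append("".join(buf).lower())
--             buf = [ch]
--         else:
--             buf.append(ch)
--     if buf:
--         tokens.append("".join(buf).lower())
--     return tokens
-- ===== Notes on version B (the rewrite author's own statement) =====
-- stated objective: simpler
-- what changed: Replaced the three-pass pipeline (build a camel-spaced string, replace each of four separators over the whole string, then split/strip/lower) by one single-pass state machine over the characters with a current-token buffer that is flushed at separator and camelCase boundaries.
import Mathlib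
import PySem

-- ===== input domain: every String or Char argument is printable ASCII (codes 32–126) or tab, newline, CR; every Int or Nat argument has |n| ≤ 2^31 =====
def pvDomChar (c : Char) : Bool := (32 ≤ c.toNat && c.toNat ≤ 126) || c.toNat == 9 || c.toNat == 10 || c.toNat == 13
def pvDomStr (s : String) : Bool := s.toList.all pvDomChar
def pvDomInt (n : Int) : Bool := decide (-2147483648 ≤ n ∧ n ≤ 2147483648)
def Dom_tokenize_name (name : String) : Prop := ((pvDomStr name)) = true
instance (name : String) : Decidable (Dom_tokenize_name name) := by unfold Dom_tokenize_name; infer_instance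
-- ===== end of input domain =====

-- B replaces A's multi-pass pipeline (camel-space string build, four whole-string replaces, split/strip/lower)
-- by one single-pass state machine with a current-token buffer; objective: simpler (same O(n) cost).

-- ===== PORT A =====
def tokenize_name (name : String) : List String :=
  if name.toList.isEmpty then []
  else
    let cs := name.toList
    -- Handle CamelCase: insert space before uppercase letters
    let result : List Char := (PySem.List.enumerate cs 0).foldl
      (fun r p =>
        (if PySem.Chars.isupper p.2 &&
            (decide (0 < p.1) && ((PySem.List.pyGet? cs (p.1 - 1)).elim false PySem.Chars.islower))
         then r ++ [' '] else r) ++ [p.2]) []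
    -- Replace common separators with spaces
    let result := [['_'], ['-'], ['.'], ['/']].foldl
      (fun r sep => PySem.Chars.replace r sep [' ']) result
    -- Split and lowercase
    ((PySem.Chars.split₀ result).filter (fun t => !(PySem.Chars.strip t).isEmpty)).map
      (fun t => String.mk (PySem.Chars.strip (PySem.Chars.lower t)))

-- ===== PORT B =====
def tokenize_name_alt (name : String) : List String :=
  let cs := name.toList
  let st := (PySem.List.enumerate cs 0).foldl
    (fun (st : List String × List Char) p =>
      if PySem.Chars.isspace p.2 || ['_', '-', '.', '/'].contains p.2 then
        (if !st.2.isEmpty then (st.1 ++ [String.mk (PySem.Chars.lower st.2)], ([] : List Char)) else st)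
      else if PySem.Chars.isupper p.2 &&
          (decide (0 < p.1) && ((PySem.List.pyGet? cs (p.1 - 1)).elim false PySem.Chars.islower)) then
        ((if !st.2.isEmpty then st.1 ++ [String.mk (PySem.Chars.lower st.2)] else st.1), [p.2])
      else (st.1, st.2 ++ [p.2]))
    ([], [])
  if !st.2.isEmpty then st.1 ++ [String.mk (PySem.Chars.lower st.2)] else st.1

-- ===== PRECONDITION & SPEC =====
def Spec_tokenize_name (name : String) (out : List String) : Prop := out = tokenize_name_alt name
instance (name : String) (out : List String) : Decidable (Spec_tokenize_name name out) := by unfold Spec_tokenize_name; infer_instance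

-- ===== CLAIM (what is proved, stated in full; the proofs are below) =====
def Claim_equal_tokenize_name : Prop := ∀ (name : String), Dom_tokenize_name name → Spec_tokenize_name name (tokenize_name name)

-- ===== LEMMAS AND PROOFS =====

-- loop bodies of the two ports, with the "previous char is lowercase" test abstracted into a Bool
def gA (r : List Char) (b : Bool) (c : Char) : List Char :=
  (if PySem.Chars.isupper c && b then r ++ [' '] else r) ++ [c]

def gB (st : List String × List Char) (b : Bool) (c : Char) : List String × List Char :=
  if PySem.Chars.isspace c || ['_', '-', '.', '/'].contains c then
    (if !st.2.isEmpty then (st.1 ++ [String.mk (PySem.Chars.lower st.2)], ([] : List Char)) else st)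
  else if PySem.Chars.isupper c && b then
    ((if !st.2.isEmpty then st.1 ++ [String.mk (PySem.Chars.lower st.2)] else st.1), [c])
  else (st.1, st.2 ++ [c])

-- structural form of "fold with a look-back at the previous character"
def recP {σ : Type} (g : σ → Bool → Char → σ) : σ → Bool → List Char → σ
  | st, _, [] => st
  | st, pl, c :: t => recP g (g st pl c) (PySem.Chars.islower c) t

def flushR (st : List String × List Char) : List String :=
  if !st.2.isEmpty then st.1 ++ [String.mk (PySem.Chars.lower st.2)] else st.1

-- the two ports restated with gA / gB (definitionally equal to the ports)
def pipeA (cs : List Char) : List String :=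
  if cs.isEmpty then []
  else
    ((PySem.Chars.split₀ ([['_'], ['-'], ['.'], ['/']].foldl
        (fun r sep => PySem.Chars.replace r sep [' '])
        ((PySem.List.enumerate cs 0).foldl
          (fun r p => gA r (decide (0 < p.1) && ((PySem.List.pyGet? cs (p.1 - 1)).elim false PySem.Chars.islower)) p.2) []))).filter
      (fun t => !(PySem.Chars.strip t).isEmpty)).map
      (fun t => String.mk (PySem.Chars.strip (PySem.Chars.lower t)))

def pipeB (cs : List Char) : List String :=
  flushR ((PySem.List.enumerate cs 0).foldl
    (fun st p => gB st (decide (0 < p.1) && ((PySem.List.pyGet? cs (p.1 - 1)).elim false PySem.Chars.islower)) p.2) ([], []))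

-- the camel pass of A, structurally
def camel : Bool → List Char → List Char
  | _, [] => []
  | pl, c :: t => (if PySem.Chars.isupper c && pl then [' '] else []) ++ c :: camel (PySem.Chars.islower c) t

def sepmap (c : Char) : Char :=
  if c = '_' ∨ c = '-' ∨ c = '.' ∨ c = '/' then ' ' else c

-- camel pass with the separator→space substitution fused in
def proc : Bool → List Char → List Char
  | _, [] => []
  | pl, c :: t => (if PySem.Chars.isupper c && pl then [' '] else []) ++ sepmap c :: proc (PySem.Chars.islower c) t

-- one-step unfolding (definitional) equations
lemma recP_nil {σ : Type} (g : σ → Bool → Char → σ) (st : σ) (pl : Bool) : recP g st pl [] = st := rfl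
lemma recP_cons {σ : Type} (g : σ → Bool → Char → σ) (st : σ) (pl : Bool) (c : Char) (t : List Char) :
    recP g st pl (c :: t) = recP g (g st pl c) (PySem.Chars.islower c) t := rfl
lemma camel_nil (pl : Bool) : camel pl [] = [] := rfl
lemma camel_cons (pl : Bool) (c : Char) (t : List Char) :
    camel pl (c :: t) = (if PySem.Chars.isupper c && pl then [' '] else []) ++ c :: camel (PySem.Chars.islower c) t := rfl
lemma proc_nil (pl : Bool) : proc pl [] = [] := rfl
lemma proc_cons (pl : Bool) (c : Char) (t : List Char) :
    proc pl (c :: t) = (if PySem.Chars.isupper c && pl then [' '] else []) ++ sepmap c :: proc (PySem.Chars.islower c) t := rfl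
lemma split_go_nil (cur : List Char) (acc : List (List Char)) :
    PySem.Chars.split₀.go [] cur acc =
      if cur.isEmpty = true then acc.reverse else (cur.reverse :: acc).reverse := rfl
lemma split_go_cons (c : Char) (s cur : List Char) (acc : List (List Char)) :
    PySem.Chars.split₀.go (c :: s) cur acc =
      if PySem.Chars.isspace c = true then
        (if cur.isEmpty = true then PySem.Chars.split₀.go s [] acc
         else PySem.Chars.split₀.go s [] (cur.reverse :: acc))
      else PySem.Chars.split₀.go s (c :: cur) acc := rfl
lemma replace_go_zero (old new l acc : List Char) :
    PySem.Chars.replace.go old new 0 l acc = acc.reverse ++ l := rfl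
lemma replace_go_succ (old new : List Char) (fuel : Nat) (c : Char) (t acc : List Char) :
    PySem.Chars.replace.go old new (fuel + 1) (c :: t) acc =
      if old.isPrefixOf (c :: t) = true then
        PySem.Chars.replace.go old new fuel (List.drop old.length (c :: t)) (new.reverse ++ acc)
      else PySem.Chars.replace.go old new fuel t (c :: acc) := rfl

lemma foldl_enum_prev {σ : Type} (g : σ → Bool → Char → σ) (cs : List Char) :
    ∀ (suf pre : List Char), cs = pre ++ suf → ∀ (st : σ),
    (PySem.List.enumerate suf (pre.length : Int)).foldl
      (fun st p => g st (decide (0 < p.1) && ((PySem.List.pyGet? cs (p.1 - 1)).elim false PySem.Chars.islower)) p.2) st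
    = recP g st (pre.getLast?.elim false PySem.Chars.islower) suf := by
  intro suf
  induction suf with
  | nil => intro pre h st; simp [PySem.List.enumerate_nil, recP_nil]
  | cons c t ih =>
    intro pre h st
    rw [PySem.List.enumerate_cons, List.foldl_cons]
    have hb : (decide (0 < (pre.length : Int)) &&
        ((PySem.List.pyGet? cs ((pre.length : Int) - 1)).elim false PySem.Chars.islower))
        = pre.getLast?.elim false PySem.Chars.islower := by
      cases pre with
      | nil => simp
      | cons a pr =>
        have hlen : (a :: pr).length = pr.length + 1 := by simp
        have hpos : (0 : Int) < ((a :: pr).length : Int) := by omega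
        have h1 : (((a :: pr).length : Int)) - 1 = (((a :: pr).length - 1 : Nat) : Int) := by omega
        rw [h1, PySem.List.pyGet?_natCast]
        have h2 : cs[(a :: pr).length - 1]? = (a :: pr).getLast? := by
          rw [h, List.getElem?_append_left (by omega)]
          exact List.getLast?_eq_getElem?.symm
        rw [h2]
        simp only [hpos, decide_eq_true_eq, decide_true]
        simp
    rw [hb, recP_cons]
    have h' : cs = (pre ++ [c]) ++ t := by rw [h]; simp
    have hrec := ih (pre ++ [c]) h' (g st (pre.getLast?.elim false PySem.Chars.islower) c)
    have hlen2 : (pre ++ [c]).length = pre.length + 1 := by simp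
    have hs : ((pre ++ [c]).length : Int) = (pre.length : Int) + 1 := by omega
    rw [hs] at hrec
    simpa using hrec

lemma foldl_enum_prev0 {σ : Type} (g : σ → Bool → Char → σ) (cs : List Char) (st : σ) :
    (PySem.List.enumerate cs 0).foldl
      (fun st p => g st (decide (0 < p.1) && ((PySem.List.pyGet? cs (p.1 - 1)).elim false PySem.Chars.islower)) p.2) st
    = recP g st false cs := by
  have h := foldl_enum_prev g cs cs [] rfl st
  simpa using h

-- ---- character-class facts ----
lemma isupper_bounds {c : Char} (h : PySem.Chars.isupper c = true) :
    65 ≤ c.toNat ∧ c.toNat ≤ 90 := by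
  simp only [PySem.Chars.isupper, Bool.and_eq_true, decide_eq_true_eq] at h
  obtain ⟨h1, h2⟩ := h
  rw [Char.le_def] at h1 h2
  rw [UInt32.le_iff_toNat_le] at h1 h2
  exact ⟨h1, h2⟩

lemma isspace_toNat (c : Char) : PySem.Chars.isspace c = true ↔
    (c.toNat = 32 ∨ (9 ≤ c.toNat ∧ c.toNat ≤ 13) ∨ (28 ≤ c.toNat ∧ c.toNat ≤ 31) ∨ c.toNat = 133 ∨
     c.toNat = 160 ∨ c.toNat = 5760 ∨ (8192 ≤ c.toNat ∧ c.toNat ≤ 8202) ∨ c.toNat = 8232 ∨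
     c.toNat = 8233 ∨ c.toNat = 8239 ∨ c.toNat = 8287 ∨ c.toNat = 12288) := by
  simp [PySem.Chars.isspace]
  tauto

lemma not_isupper_of_isspace {c : Char} (h : PySem.Chars.isspace c = true) :
    PySem.Chars.isupper c = false := by
  cases hu : PySem.Chars.isupper c
  · rfl
  · have hb := isupper_bounds hu
    have hs := (isspace_toNat c).mp h
    omega

lemma isspace_lowerChar (c : Char) :
    PySem.Chars.isspace (PySem.Chars.lowerChar c) = PySem.Chars.isspace c := by
  unfold PySem.Chars.lowerChar
  by_cases hu : PySem.Chars.isupper c = true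
  · have hb := isupper_bounds hu
    have hvalid : (c.toNat + 32).isValidChar := Or.inl (by omega)
    have hv : (Char.ofNat (c.toNat + 32)).toNat = c.toNat + 32 := by
      rw [Char.toNat_ofNat, if_pos hvalid]
    rw [if_pos hu]
    have hcf : PySem.Chars.isspace c = false := by
      cases hcs : PySem.Chars.isspace c
      · rfl
      · have := (isspace_toNat c).mp hcs; omega
    have hlf : PySem.Chars.isspace (Char.ofNat (c.toNat + 32)) = false := by
      cases hcs : PySem.Chars.isspace (Char.ofNat (c.toNat + 32))
      · rfl
      · have := (isspace_toNat _).mp hcs; rw [hv] at this; omega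
    rw [hcf, hlf]
  · rw [if_neg hu]

lemma contains_sep_iff (c : Char) :
    (['_', '-', '.', '/'].contains c = true) ↔ (c = '_' ∨ c = '-' ∨ c = '.' ∨ c = '/') := by
  simp [List.contains_eq_mem]

lemma not_isupper_of_sep {c : Char} (h : c = '_' ∨ c = '-' ∨ c = '.' ∨ c = '/') :
    PySem.Chars.isupper c = false := by
  rcases h with h | h | h | h <;> subst h <;> decide

-- ---- A's passes normalised ----
lemma recP_gA (cs : List Char) : ∀ (pl : Bool) (r : List Char),
    recP gA r pl cs = r ++ camel pl cs := by
  induction cs with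
  | nil => intro pl r; simp [recP_nil, camel_nil]
  | cons c t ih =>
    intro pl r
    rw [recP_cons, camel_cons, ih]
    unfold gA
    by_cases hg : (PySem.Chars.isupper c && pl) = true <;> simp [hg]

lemma replace_go_single (a b : Char) : ∀ (l acc : List Char),
    PySem.Chars.replace.go [a] [b] l.length l acc
      = acc.reverse ++ l.map (fun c => if c = a then b else c) := by
  intro l
  induction l with
  | nil => intro acc; simp [replace_go_zero]
  | cons c t ih =>
    intro acc
    rw [List.length_cons, replace_go_succ]
    by_cases hac : (a == c) = true
    · have hca : c = a := (beq_iff_eq.mp hac).symm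
      subst hca
      rw [if_pos (by simp [List.isPrefixOf])]
      simp only [List.length_cons, List.length_nil, List.drop_succ_cons, List.drop_zero,
        List.reverse_cons, List.reverse_nil, List.nil_append, List.singleton_append]
      rw [ih]
      simp
    · have hca : ¬(c = a) := by
        intro hcc; subst hcc; simp at hac
      rw [if_neg (by simp [List.isPrefixOf, hac])]
      rw [ih]
      simp [hca]

lemma replace_single (a b : Char) (s : List Char) :
    PySem.Chars.replace s [a] [b] = s.map (fun c => if c = a then b else c) := by
  unfold PySem.Chars.replace
  rw [if_neg (by simp)]
  simpa using replace_go_single a b s []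

lemma four_replaces (r : List Char) :
    [['_'], ['-'], ['.'], ['/']].foldl (fun r sep => PySem.Chars.replace r sep [' ']) r
      = r.map sepmap := by
  simp only [List.foldl_cons, List.foldl_nil]
  rw [replace_single, replace_single, replace_single, replace_single]
  simp only [List.map_map]
  apply List.map_congr_left
  intro c _
  simp only [Function.comp_apply, sepmap]
  by_cases h1 : c = '_' <;> by_cases h2 : c = '-' <;> by_cases h3 : c = '.' <;> by_cases h4 : c = '/' <;>
    simp_all

lemma map_sepmap_camel : ∀ (cs : List Char) (pl : Bool),
    (camel pl cs).map sepmap = proc pl cs := by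
  intro cs
  induction cs with
  | nil => intro pl; simp [camel_nil, proc_nil]
  | cons c t ih =>
    intro pl
    rw [camel_cons, proc_cons]
    have hsp : sepmap ' ' = ' ' := by decide
    by_cases hg : (PySem.Chars.isupper c && pl) = true <;> simp [hg, ih, hsp]

-- ---- split₀.go lemmas ----
lemma split_go_acc : ∀ (s cur : List Char) (acc : List (List Char)),
    PySem.Chars.split₀.go s cur acc = acc.reverse ++ PySem.Chars.split₀.go s cur [] := by
  intro s
  induction s with
  | nil =>
    intro cur acc
    by_cases h : cur.isEmpty = true <;> simp [split_go_nil, h]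
  | cons c t ih =>
    intro cur acc
    rw [split_go_cons, split_go_cons]
    by_cases hsp : PySem.Chars.isspace c = true
    · rw [if_pos hsp, if_pos hsp]
      by_cases hce : cur.isEmpty = true
      · rw [if_pos hce, if_pos hce]
        exact ih [] acc
      · rw [if_neg hce, if_neg hce]
        rw [ih [] (cur.reverse :: acc), ih [] [cur.reverse]]
        simp
    · rw [if_neg hsp, if_neg hsp]
      exact ih (c :: cur) acc

lemma split_go_tokens : ∀ (s cur : List Char) (acc : List (List Char)),
    (∀ t ∈ acc, t ≠ [] ∧ t.all (fun c => !PySem.Chars.isspace c) = true) →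
    cur.all (fun c => !PySem.Chars.isspace c) = true →
    ∀ t ∈ PySem.Chars.split₀.go s cur acc, t ≠ [] ∧ t.all (fun c => !PySem.Chars.isspace c) = true := by
  intro s
  induction s with
  | nil =>
    intro cur acc hacc hcur t ht
    rw [split_go_nil] at ht
    by_cases hce : cur.isEmpty = true
    · rw [if_pos hce] at ht
      exact hacc t (by simpa using ht)
    · rw [if_neg hce] at ht
      rw [List.mem_reverse] at ht
      rcases List.mem_cons.mp ht with rfl | ht'
      · constructor
        · simpa using fun hc => hce (by simp [hc])
        · simpa using hcur
      · exact hacc t ht'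
  | cons c t ih =>
    intro cur acc hacc hcur u hu
    rw [split_go_cons] at hu
    by_cases hsp : PySem.Chars.isspace c = true
    · rw [if_pos hsp] at hu
      by_cases hce : cur.isEmpty = true
      · rw [if_pos hce] at hu
        exact ih [] acc hacc (by simp) u hu
      · rw [if_neg hce] at hu
        refine ih [] (cur.reverse :: acc) ?_ (by simp) u hu
        intro v hv
        rcases List.mem_cons.mp hv with rfl | hv'
        · constructor
          · simpa using fun hc => hce (by simp [hc])
          · simpa using hcur
        · exact hacc v hv'
    · rw [if_neg hsp] at hu
      refine ih (c :: cur) acc hacc ?_ u hu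
      simp [hcur, hsp]

-- ---- strip is the identity on space-free tokens ----
lemma dropWhile_all_not (p : Char → Bool) (l : List Char)
    (h : l.all (fun c => !p c) = true) : l.dropWhile p = l := by
  cases l with
  | nil => simp
  | cons c t =>
    simp only [List.all_cons, Bool.and_eq_true, Bool.not_eq_true'] at h
    rw [List.dropWhile_cons, if_neg (by simp [h.1])]

lemma strip_id {t : List Char} (h : t.all (fun c => !PySem.Chars.isspace c) = true) :
    PySem.Chars.strip t = t := by
  unfold PySem.Chars.strip PySem.Chars.lstrip PySem.Chars.rstrip
  rw [dropWhile_all_not _ _ h, dropWhile_all_not _ _ (by simpa using h), List.reverse_reverse]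

lemma all_lower {t : List Char} (h : t.all (fun c => !PySem.Chars.isspace c) = true) :
    (PySem.Chars.lower t).all (fun c => !PySem.Chars.isspace c) = true := by
  unfold PySem.Chars.lower
  rw [List.all_map]
  refine List.all_eq_true.mpr ?_
  intro c hc
  have hh := List.all_eq_true.mp h c hc
  simpa [Function.comp, isspace_lowerChar] using hh

-- ---- the main invariant: B's machine computes A's split-lower of proc ----
lemma main_inv : ∀ (cs : List Char) (pl : Bool) (buf : List Char) (toks : List String),
    buf.all (fun c => !PySem.Chars.isspace c) = true →
    flushR (recP gB (toks, buf) pl cs)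
      = toks ++ (PySem.Chars.split₀.go (proc pl cs) buf.reverse []).map
          (fun t => String.mk (PySem.Chars.lower t)) := by
  intro cs
  induction cs with
  | nil =>
    intro pl buf toks hbuf
    rw [recP_nil, proc_nil, split_go_nil]
    by_cases hb : buf.isEmpty = true
    · have hbz : buf = [] := List.isEmpty_iff.mp hb
      subst hbz
      simp [flushR]
    · have hbf : buf.isEmpty = false := by
        cases h : buf.isEmpty
        · rfl
        · exact absurd h hb
      rw [if_neg (by simp [List.isEmpty_reverse, hbf])]
      simp [flushR, hbf]
  | cons c t ih =>
    intro pl buf toks hbuf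
    rw [recP_cons]
    by_cases hb1 : (PySem.Chars.isspace c || ['_', '-', '.', '/'].contains c) = true
    · -- boundary character: flush
      have hup : PySem.Chars.isupper c = false := by
        rcases Bool.or_eq_true_iff.mp hb1 with h | h
        · exact not_isupper_of_isspace h
        · exact not_isupper_of_sep ((contains_sep_iff c).mp h)
      have hpr : proc pl (c :: t) = sepmap c :: proc (PySem.Chars.islower c) t := by
        rw [proc_cons, hup]
        simp
      have hsps : PySem.Chars.isspace (sepmap c) = true := by
        by_cases hmem : c = '_' ∨ c = '-' ∨ c = '.' ∨ c = '/'
        · simp only [sepmap, if_pos hmem]; decide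
        · have hsc : PySem.Chars.isspace c = true := by
            rcases Bool.or_eq_true_iff.mp hb1 with h | h
            · exact h
            · exact absurd ((contains_sep_iff c).mp h) hmem
          simp only [sepmap, if_neg hmem]; exact hsc
      rw [hpr]
      by_cases hbe : buf.isEmpty = true
      · have hbz : buf = [] := List.isEmpty_iff.mp hbe
        subst hbz
        have hgB : gB (toks, ([] : List Char)) pl c = (toks, []) := by
          unfold gB
          rw [if_pos hb1]
          simp
        rw [hgB, ih (PySem.Chars.islower c) [] toks (by simp)]
        rw [split_go_cons, if_pos hsps]
        simp
      · have hbf : buf.isEmpty = false := by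
          cases h : buf.isEmpty
          · rfl
          · exact absurd h hbe
        have hgB : gB (toks, buf) pl c = (toks ++ [String.mk (PySem.Chars.lower buf)], ([] : List Char)) := by
          unfold gB
          rw [if_pos hb1]
          simp [hbf]
        rw [hgB, ih (PySem.Chars.islower c) [] (toks ++ [String.mk (PySem.Chars.lower buf)]) (by simp)]
        have hgo : PySem.Chars.split₀.go (sepmap c :: proc (PySem.Chars.islower c) t) buf.reverse []
            = [buf] ++ PySem.Chars.split₀.go (proc (PySem.Chars.islower c) t) [] [] := by
          rw [split_go_cons, if_pos hsps,
              if_neg (by simp [List.isEmpty_reverse, hbf])]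
          rw [split_go_acc _ _ [buf.reverse.reverse]]
          simp
        rw [hgo]
        simp
    · -- not a boundary
      have hspc : PySem.Chars.isspace c = false := by
        cases hb : PySem.Chars.isspace c
        · rfl
        · exact absurd (by rw [hb]; rfl) hb1
      have hctn : (['_', '-', '.', '/'].contains c) = false := by
        cases hb : ['_', '-', '.', '/'].contains c
        · rfl
        · exact absurd (by rw [hb, Bool.or_true]) hb1
      have hb1' : (PySem.Chars.isspace c || ['_', '-', '.', '/'].contains c) = false := by
        rw [hspc, hctn]; rfl
      have hsep : sepmap c = c := by
        have hnm : ¬(c = '_' ∨ c = '-' ∨ c = '.' ∨ c = '/') := by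
          intro hmem
          rw [(contains_sep_iff c).mpr hmem] at hctn
          cases hctn
        simp only [sepmap, if_neg hnm]
      by_cases hg : (PySem.Chars.isupper c && pl) = true
      · -- camelCase boundary
        have hgB : gB (toks, buf) pl c =
            ((if !buf.isEmpty then toks ++ [String.mk (PySem.Chars.lower buf)] else toks), [c]) := by
          unfold gB
          rw [if_neg (by rw [hb1']; simp), if_pos hg]
        have hpr : proc pl (c :: t) = ' ' :: c :: proc (PySem.Chars.islower c) t := by
          rw [proc_cons, hg, hsep]
          simp
        rw [hgB, hpr]
        rw [ih (PySem.Chars.islower c) [c]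
              (if !buf.isEmpty then toks ++ [String.mk (PySem.Chars.lower buf)] else toks)
              (by simp [hspc])]
        have hgo : PySem.Chars.split₀.go (' ' :: c :: proc (PySem.Chars.islower c) t) buf.reverse []
            = (if !buf.isEmpty then [buf] else [])
              ++ PySem.Chars.split₀.go (proc (PySem.Chars.islower c) t) [c].reverse [] := by
          rw [split_go_cons, if_pos (by decide)]
          by_cases hbe : buf.isEmpty = true
          · rw [if_pos (by simp [List.isEmpty_reverse, hbe])]
            rw [split_go_cons, if_neg (by simp [hspc])]
            simp [hbe]
          · have hbf : buf.isEmpty = false := by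
              cases h : buf.isEmpty
              · rfl
              · exact absurd h hbe
            rw [if_neg (by simp [List.isEmpty_reverse, hbf])]
            rw [split_go_acc _ _ [buf.reverse.reverse]]
            rw [split_go_cons, if_neg (by simp [hspc])]
            simp [hbf]
        rw [hgo]
        by_cases hbe : buf.isEmpty = true
        · simp [hbe]
        · have hbf : buf.isEmpty = false := by
            cases h : buf.isEmpty
            · rfl
            · exact absurd h hbe
          simp [hbf]
      · -- plain character: extend the buffer
        have hgf : (PySem.Chars.isupper c && pl) = false := by
          cases h : (PySem.Chars.isupper c && pl)
          · rfl
          · exact absurd h hg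
        have hgB : gB (toks, buf) pl c = (toks, buf ++ [c]) := by
          unfold gB
          rw [if_neg (by rw [hb1']; simp), if_neg hg]
        have hpr : proc pl (c :: t) = c :: proc (PySem.Chars.islower c) t := by
          rw [proc_cons, hgf, hsep]
          simp
        rw [hgB, hpr]
        rw [ih (PySem.Chars.islower c) (buf ++ [c]) toks (by simp [List.all_append, hbuf, hspc])]
        rw [split_go_cons, if_neg (by simp [hspc])]
        rw [List.reverse_append]
        simp

-- ---- the pipelines agree ----
lemma pipe_eq (cs : List Char) : pipeA cs = pipeB cs := by
  by_cases hnil : cs.isEmpty = true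
  · have hz : cs = [] := List.isEmpty_iff.mp hnil
    subst hz
    simp [pipeA, pipeB, flushR, PySem.List.enumerate_nil]
  · unfold pipeA pipeB
    rw [if_neg hnil]
    rw [foldl_enum_prev0 gA cs [], foldl_enum_prev0 gB cs ([], [])]
    rw [recP_gA, List.nil_append, four_replaces, map_sepmap_camel]
    rw [main_inv cs false [] [] (by simp)]
    have hsplit : PySem.Chars.split₀ (proc false cs) = PySem.Chars.split₀.go (proc false cs) [] [] := rfl
    have htok := split_go_tokens (proc false cs) [] [] (by simp) (by simp)
    rw [hsplit]
    have hf : ∀ t ∈ PySem.Chars.split₀.go (proc false cs) [] [],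
        (!(PySem.Chars.strip t).isEmpty) = true := by
      intro t ht
      obtain ⟨hne, hall⟩ := htok t ht
      rw [strip_id hall]
      simpa using hne
    rw [List.filter_eq_self.mpr hf]
    have hm : ∀ t ∈ PySem.Chars.split₀.go (proc false cs) [] [],
        String.mk (PySem.Chars.strip (PySem.Chars.lower t)) = String.mk (PySem.Chars.lower t) := by
      intro t ht
      obtain ⟨hne, hall⟩ := htok t ht
      rw [strip_id (all_lower hall)]
    rw [List.map_congr_left hm]
    simp

-- ===== VERDICT (by name: the statement is the Claim_ definition above) =====
theorem tokenize_name_spec : Claim_equal_tokenize_name := by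
  unfold Claim_equal_tokenize_name
  intro name _
  unfold Spec_tokenize_name
  have hA : tokenize_name name = pipeA name.toList := rfl
  have hB : tokenize_name_alt name = pipeB name.toList := rfl
  rw [hA, hB, pipe_eq]
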